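-- pv_equiv track=rewrite | github.com/kimjongha99/codeplus | 프로그래머스/1/42748. K번째수/K번째수.py | solution
-- ===== SOURCE A (Python) =====
-- def solution(array, commands):
--     answer = []
--
--     # commands의len을 반복한다.
--     for i in range(len(commands)):
--         x = commands[i][0]
--         y = commands[i][1]
--         z = commands[i][2]
--         extracted_part = array[x-1:y]
--         extracted_part.sort()
--         answer.append(extracted_part[z-1])
--
--     return answer
-- ===== SOURCE B (Python) =====
-- def _insert(lst, v):
--     # new list = lst with v inserted keeping ascending order
--     if not lst or v < lst[0]:
--         return [v] + lst
--     return [lst[0]] + _insert(lst[1:], v)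
--
--
-- def solution(array, commands):
--     answer = []
--     for c in commands:
--         x, y, z = c[0], c[1], c[2]
--         best = []  # the z smallest elements seen so far, ascending
--         for v in array[x - 1:y]:
--             if len(best) < z:
--                 best = _insert(best, v)
--             elif v < best[-1]:
--                 best = _insert(best[:-1], v)
--         answer.append(best[-1])
--     return answer
-- ===== Notes on version B (the rewrite author's own statement) =====
-- stated objective: alternative
-- what changed: Replaces the full sort of each slice followed by indexing with a bounded partial-selection pass that maintains only the z smallest elements seen so far in a small sorted buffer and returns its last element.
-- outside the precondition, e.g. on solution([1, 2, 3], [[1, 3, 0]]): A returns [3], B raises IndexError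
import Mathlib
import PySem

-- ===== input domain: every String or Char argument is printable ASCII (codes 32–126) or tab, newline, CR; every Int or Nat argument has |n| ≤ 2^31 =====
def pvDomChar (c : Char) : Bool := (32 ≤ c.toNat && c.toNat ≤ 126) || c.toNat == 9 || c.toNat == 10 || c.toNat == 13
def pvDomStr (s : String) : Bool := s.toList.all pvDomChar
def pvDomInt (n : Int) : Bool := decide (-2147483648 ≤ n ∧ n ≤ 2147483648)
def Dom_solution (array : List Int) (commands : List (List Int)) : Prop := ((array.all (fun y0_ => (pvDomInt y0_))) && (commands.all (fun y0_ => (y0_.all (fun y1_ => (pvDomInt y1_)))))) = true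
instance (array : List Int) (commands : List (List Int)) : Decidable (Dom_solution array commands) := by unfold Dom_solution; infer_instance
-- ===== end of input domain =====

-- B replaces the sort-whole-slice-then-index of A by a bounded partial selection keeping
-- only the z smallest elements seen; equal on Pre_ (valid commands), no speed claim.

-- ===== PORT A =====
-- for each command: x,y,z = c[0],c[1],c[2]; sort array[x-1:y]; append sorted[z-1]
-- (pyGetD … 0: default never used under Pre_, which makes every index valid)
def solution (array : List Int) (commands : List (List Int)) : List Int :=
  commands.foldl (fun answer c =>
    let x := PySem.List.pyGetD c 0 0
    let y := PySem.List.pyGetD c 1 0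
    let z := PySem.List.pyGetD c 2 0
    let extracted := PySem.List.sorted (PySem.List.slice array (some (x - 1)) (some y)) (fun v => v) false
    answer ++ [PySem.List.pyGetD extracted (z - 1) 0]) []

-- ===== PORT B =====
-- _insert: new list = lst with v inserted keeping ascending order
def pvInsert (lst : List Int) (v : Int) : List Int :=
  match lst with
  | [] => [v]
  | a :: t => if v < a then v :: a :: t else a :: pvInsert t v

def solution_alt (array : List Int) (commands : List (List Int)) : List Int :=
  commands.foldl (fun answer c =>
    let x := PySem.List.pyGetD c 0 0
    let y := PySem.List.pyGetD c 1 0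
    let z := PySem.List.pyGetD c 2 0
    let best := (PySem.List.slice array (some (x - 1)) (some y)).foldl (fun best v =>
      if (best.length : Int) < z then pvInsert best v
      else if v < PySem.List.pyGetD best (-1) 0 then
        pvInsert (PySem.List.slice best none (some (-1))) v
      else best) []
    answer ++ [PySem.List.pyGetD best (-1) 0]) []

-- ===== PRECONDITION & SPEC =====
-- Pre_ excludes commands on which A raises (fewer than 3 entries, or z-1 outside the
-- sorted slice) and commands with z ≤ 0, where A's value comes from Python's negative-index
-- wraparound and B's selection raises IndexError.
def Pre_solution (array : List Int) (commands : List (List Int)) : Prop :=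
  ∀ c ∈ commands, 3 ≤ c.length ∧
    1 ≤ PySem.List.pyGetD c 2 0 ∧
    PySem.List.pyGetD c 2 0 ≤
      ((PySem.List.slice array (some (PySem.List.pyGetD c 0 0 - 1)) (some (PySem.List.pyGetD c 1 0))).length : Int)
instance (array : List Int) (commands : List (List Int)) : Decidable (Pre_solution array commands) := by unfold Pre_solution; infer_instance

def pvWitness_solution : List Int × List (List Int) := ([1, 5, 2, 6, 3, 7, 4], [[2, 5, 3], [4, 4, 1], [1, 7, 3]])

def Spec_solution (array : List Int) (commands : List (List Int)) (out : List Int) : Prop := out = solution_alt array commands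
instance (array : List Int) (commands : List (List Int)) (out : List Int) : Decidable (Spec_solution array commands out) := by unfold Spec_solution; infer_instance

-- ===== CLAIM (what is proved, stated in full; the proofs are below) =====
def Claim_equal_solution : Prop := ∀ (array : List Int) (commands : List (List Int)), Dom_solution array commands → Pre_solution array commands → Spec_solution array commands (solution array commands)

-- ===== LEMMAS AND PROOFS =====

theorem pvInsert_perm (lst : List Int) (v : Int) : (pvInsert lst v).Perm (v :: lst) := by
  induction lst with
  | nil => simp [pvInsert]
  | cons a t ih =>
    simp only [pvInsert]
    split
    · exact List.Perm.refl _
    · exact (ih.cons a).trans (List.Perm.swap v a t)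

theorem pvInsert_pairwise (lst : List Int) (v : Int) (h : lst.Pairwise (· ≤ ·)) :
    (pvInsert lst v).Pairwise (· ≤ ·) := by
  induction lst with
  | nil => simp [pvInsert]
  | cons a t ih =>
    simp only [pvInsert]
    rcases List.pairwise_cons.mp h with ⟨ha, ht⟩
    split
    · rename_i hv
      refine List.pairwise_cons.mpr ⟨?_, h⟩
      intro b hb
      rcases hb with _ | hb
      · exact le_of_lt hv
      · exact le_trans (le_of_lt hv) (ha _ (by assumption))
    · rename_i hv
      refine List.pairwise_cons.mpr ⟨?_, ih ht⟩
      intro b hb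
      rcases List.mem_cons.mp ((pvInsert_perm t v).mem_iff.mp hb) with rfl | hb'
      · omega
      · exact ha _ hb' 

theorem pvInsert_length (lst : List Int) (v : Int) : (pvInsert lst v).length = lst.length + 1 := by
  induction lst with
  | nil => simp [pvInsert]
  | cons a t ih => simp only [pvInsert]; split <;> simp [ih]

theorem sorted_append_singleton (l : List Int) (v : Int) :
    PySem.List.sorted (l ++ [v]) (fun x => x) false =
      pvInsert (PySem.List.sorted l (fun x => x) false) v := by
  apply PySem.List.sorted_id_eq_of_perm_of_pairwise
  · exact (pvInsert_perm _ v).trans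
      (((PySem.List.sorted_perm (key := fun x => x) (rev := false) (xs := l)).cons v).trans
        (List.perm_append_comm (l₁ := [v]) (l₂ := l)))
  · exact pvInsert_pairwise _ v (by simpa using PySem.List.sorted_pairwise (xs := l) (key := fun x => x))

-- insertion past position k leaves the first k+1 elements alone
theorem take_pvInsert_of_le (s : List Int) (v : Int) (k : Nat) (hk : k < s.length)
    (hs : s.Pairwise (· ≤ ·)) (h : s[k] ≤ v) :
    (pvInsert s v).take (k + 1) = s.take (k + 1) := by
  induction s generalizing k with
  | nil => simp at hk
  | cons a t ih =>
    rcases List.pairwise_cons.mp hs with ⟨ha, ht⟩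
    simp only [pvInsert]
    cases k with
    | zero =>
      simp only [List.getElem_cons_zero] at h
      rw [if_neg (by omega)]
      simp
    | succ m =>
      simp only [List.getElem_cons_succ] at h
      have hav : a ≤ v := le_trans (ha _ (List.getElem_mem _)) h
      rw [if_neg (by omega)]
      simp only [List.take_succ_cons]
      rw [ih m (by simpa using hk) ht h]

-- insertion before position k pushes s[k] out of the first k+1 elements
theorem take_pvInsert_of_lt (s : List Int) (v : Int) (k : Nat) (hk : k < s.length)
    (hs : s.Pairwise (· ≤ ·)) (h : v < s[k]) :
    (pvInsert s v).take (k + 1) = pvInsert (s.take k) v := by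
  induction s generalizing k with
  | nil => simp at hk
  | cons a t ih =>
    rcases List.pairwise_cons.mp hs with ⟨ha, ht⟩
    simp only [pvInsert]
    by_cases hva : v < a
    · rw [if_pos hva]
      cases k with
      | zero => simp [pvInsert]
      | succ m =>
        simp only [List.take_succ_cons]
        simp [pvInsert, hva]
    · rw [if_neg hva]
      cases k with
      | zero =>
        simp only [List.getElem_cons_zero] at h
        omega
      | succ m =>
        simp only [List.getElem_cons_succ] at h
        simp only [List.take_succ_cons]
        rw [ih m (by simpa using hk) ht h]
        simp [pvInsert, hva]

theorem pvDropLastTake {α : Type} (l : List α) (k : Nat) (h : k ≤ l.length) :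
    (l.take k).dropLast = l.take (k - 1) := by
  rw [List.dropLast_eq_take, List.take_take]
  congr 1
  simp [h]

-- the inner loop of B computes the z smallest elements of the processed prefix, ascending
theorem bfold_eq (z : Int) (hz : 1 ≤ z) (l : List Int) :
    l.foldl (fun best v =>
      if (best.length : Int) < z then pvInsert best v
      else if v < PySem.List.pyGetD best (-1) 0 then
        pvInsert (PySem.List.slice best none (some (-1))) v
      else best) [] = (PySem.List.sorted l (fun x => x) false).take z.toNat := by
  induction l using List.reverseRecOn with
  | nil => simp [PySem.List.sorted]
  | append_singleton l v ih =>
    rw [List.foldl_append, List.foldl_cons, List.foldl_nil, ih, sorted_append_singleton]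
    set s := PySem.List.sorted l (fun x => x) false with hsdef
    have hs : s.Pairwise (· ≤ ·) := by simpa using PySem.List.sorted_pairwise (xs := l) (key := fun x => x)
    have hk1 : 1 ≤ z.toNat := by omega
    by_cases hlen : s.length < z.toNat
    · rw [List.take_of_length_le (by omega)]
      rw [if_pos (by omega)]
      rw [List.take_of_length_le (by rw [pvInsert_length]; omega)]
    · have hlen' : z.toNat ≤ s.length := by omega
      have htk : (s.take z.toNat).length = z.toNat := by simp [hlen']
      have hne : s.take z.toNat ≠ [] := by
        intro hc; rw [hc] at htk; simp at htk; omega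
      rw [if_neg (by rw [htk]; omega)]
      have hidx : z.toNat - 1 < s.length := by omega
      have hlast : PySem.List.pyGetD (s.take z.toNat) (-1) 0 = s[z.toNat - 1] := by
        rw [PySem.List.pyGetD_neg_one (h := hne), List.getLast_eq_getElem]
        simp only [htk]
        rw [List.getElem_take]
      rw [hlast]
      have hzk : z.toNat = (z.toNat - 1) + 1 := by omega
      by_cases hv : v < s[z.toNat - 1]
      · rw [if_pos hv, PySem.List.slice_to_neg_one, pvDropLastTake s z.toNat hlen']
        have h1 := take_pvInsert_of_lt s v (z.toNat - 1) hidx hs hv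
        rw [← hzk] at h1
        exact h1.symm
      · rw [if_neg hv]
        have h1 := take_pvInsert_of_le s v (z.toNat - 1) hidx hs (by omega)
        rw [← hzk] at h1
        exact h1.symm

-- ===== VERDICT (by name: the statement is the Claim_ definition above) =====
theorem solution_spec : Claim_equal_solution := by
  intro array commands _ hpre
  unfold Spec_solution solution solution_alt
  rw [PySem.List.foldl_append_singleton_eq_map, PySem.List.foldl_append_singleton_eq_map]
  simp only [List.nil_append]
  apply List.map_congr_left
  intro c hc
  rcases hpre c hc with ⟨hlen, hz1, hzle⟩
  set x := PySem.List.pyGetD c 0 0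
  set y := PySem.List.pyGetD c 1 0
  set z := PySem.List.pyGetD c 2 0
  set sl := PySem.List.slice array (some (x - 1)) (some y) with hsl
  rw [bfold_eq z hz1]
  set s := PySem.List.sorted sl (fun v => v) false with hsdef
  have hslen : s.length = sl.length := by simp [hsdef, PySem.List.length_sorted]
  have hlen' : z.toNat ≤ s.length := by omega
  have htk : (s.take z.toNat).length = z.toNat := by simp [hlen']
  have hne : s.take z.toNat ≠ [] := by
    intro hc2; rw [hc2] at htk; simp at htk; omega
  rw [PySem.List.pyGetD_neg_one (h := hne), List.getLast_eq_getElem]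
  rw [PySem.List.pyGetD_eq_getElem s 0 (by omega) (by omega)]
  simp only [htk]
  rw [List.getElem_take]
  congr 1
  omega
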